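-- pv_equiv track=rewrite | github.com/li-jiang-yan/dw-1d-project | SUTD T3 - DW - 1D - Admin.py | is_valid_num
-- ===== SOURCE A (Python) =====
-- def is_valid_num(string):
--     if string == '': # String cannot be empty
--         return False
--     elif string.isdigit():
--         return True
--     else:
--         if string.count('.') == 1 and len(string) > 1:
--             for char in string:
--                 if not(char in ['0', '1', '2', '3', '4', '5',
--                                 '6', '7', '8', '9', '.']):
--                     return False
--             if string.find('.') < len(string) - 3:
--                 return False
--             if float(string) < 0:
--                 return False
--             return True
--         else:
--             return False
-- ===== SOURCE B (Python) =====
-- def is_valid_num(string):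
--     # One left-to-right pass of a finite-state machine.
--     # state 0: still in the integer part; state >= 1: past the dot,
--     # encoding 1 + the number of fractional digits seen so far.
--     state = 0
--     for char in string:
--         if '0' <= char <= '9':
--             if state:
--                 state += 1
--         elif char == '.':
--             if state:
--                 return False
--             state = 1
--         else:
--             return False
--     if not string:
--         return False
--     if state == 0:
--         return True
--     return len(string) > 1 and state <= 3
-- ===== Notes on version B (the rewrite author's own statement) =====
-- stated objective: alternative
-- what changed: B replaces A's staged checks (digit-string fast path, a dot count, a char-by-char membership scan over a literal list, find/len index arithmetic and a float comparison) with a single left-to-right finite-state machine whose integer state tracks whether the dot was seen and how many fractional digits followed, deciding at the end from that one accumulator.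
import Mathlib
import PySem

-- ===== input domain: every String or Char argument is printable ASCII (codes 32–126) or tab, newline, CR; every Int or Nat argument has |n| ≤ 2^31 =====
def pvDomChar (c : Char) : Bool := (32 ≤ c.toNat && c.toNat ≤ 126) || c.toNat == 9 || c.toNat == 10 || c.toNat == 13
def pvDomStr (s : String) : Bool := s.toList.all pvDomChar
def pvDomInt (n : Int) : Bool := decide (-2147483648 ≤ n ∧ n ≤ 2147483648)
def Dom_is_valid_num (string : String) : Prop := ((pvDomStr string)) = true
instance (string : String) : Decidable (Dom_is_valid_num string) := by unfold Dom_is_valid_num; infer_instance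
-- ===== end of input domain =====

-- B replaces A's staged checks (isdigit, count, membership scan, find/len arithmetic,
-- float comparison) with one left-to-right finite-state pass (alternative; return value only).

-- ===== PORT A =====
-- hand port of `float(string) < 0`: exact on every string that reaches it in A
-- (only digits and '.', so the float is nonnegative; a negative float literal starts with '-')
def pyFloatLtZero (s : String) : Bool := PySem.Str.startswith s "-"

def is_valid_num (string : String) : Bool :=
  if string == "" then false
  else if PySem.Str.strIsdigit string then true
  else
    if PySem.Str.count string "." == 1 && decide (1 < PySem.Str.len string) then
      if string.toList.all (fun char =>
          char ∈ ['0', '1', '2', '3', '4', '5', '6', '7', '8', '9', '.']) then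
        if decide (PySem.Str.find string "." < PySem.Str.len string - 3) then false
        else if pyFloatLtZero string then false
        else true
      else false
    else false

-- ===== PORT B =====
-- the for-loop of Source B: state 0 = integer part, state ≥ 1 = 1 + fractional digits seen;
-- none = an early `return False` inside the loop
def dfaGo : List Char → Nat → Option Nat
  | [], state => some state
  | char :: rest, state =>
    if decide ('0' ≤ char) && decide (char ≤ '9') then
      dfaGo rest (if state ≠ 0 then state + 1 else state)
    else if char = '.' then
      if state ≠ 0 then none else dfaGo rest 1
    else none

def is_valid_num_alt (string : String) : Bool :=
  match dfaGo string.toList 0 with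
  | none => false
  | some state =>
    if string.toList.isEmpty then false
    else if state = 0 then true
    else decide (1 < string.toList.length) && decide (state ≤ 3)

-- ===== PRECONDITION & SPEC =====
def Spec_is_valid_num (string : String) (out : Bool) : Prop := out = is_valid_num_alt string
instance (string : String) (out : Bool) : Decidable (Spec_is_valid_num string out) := by unfold Spec_is_valid_num; infer_instance

-- ===== CLAIM (what is proved, stated in full; the proofs are below) =====
def Claim_equal_is_valid_num : Prop := ∀ (string : String), Dom_is_valid_num string → Spec_is_valid_num string (is_valid_num string)

-- ===== LEMMAS AND PROOFS =====

-- proof-side decomposition at the first '.': (before, whether a '.' occurs, after)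
def partitionDot : List Char → List Char × Bool × List Char
  | [] => ([], false, [])
  | c :: rest =>
    if c = '.' then ([], true, rest)
    else (c :: (partitionDot rest).1, (partitionDot rest).2.1, (partitionDot rest).2.2)

theorem partitionDot_spec (cs : List Char) :
    (if (partitionDot cs).2.1 then
       cs = (partitionDot cs).1 ++ '.' :: (partitionDot cs).2.2
     else cs = (partitionDot cs).1)
    ∧ '.' ∉ (partitionDot cs).1 := by
  induction cs with
  | nil => simp [partitionDot]
  | cons c rest ih =>
    by_cases h : c = '.'
    · simp [partitionDot, h]
    · obtain ⟨h1, h2⟩ := ih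
      simp only [partitionDot, if_neg h]
      cases hs : (partitionDot rest).2.1
      · rw [hs] at h1
        simp only [Bool.false_eq_true, if_false]
        exact ⟨by rw [← h1], by simp [Ne.symm h, h2]⟩
      · rw [hs, if_pos rfl] at h1
        refine ⟨?_, by simp [Ne.symm h, h2]⟩
        rw [if_pos rfl, List.cons_append, ← h1]

-- count.go with the one-char needle ['.'] and enough fuel counts occurrences of '.'
theorem countGo_dot (fuel : Nat) : ∀ (cs : List Char) (acc : Nat), cs.length ≤ fuel →
    PySem.Chars.count.go ['.'] fuel cs acc = acc + cs.count '.' := by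
  induction fuel with
  | zero =>
    intro cs acc h
    have : cs = [] := List.length_eq_zero_iff.mp (Nat.le_zero.mp h)
    subst this; simp [PySem.Chars.count.go]
  | succ n ih =>
    intro cs acc h
    cases cs with
    | nil => simp [PySem.Chars.count.go]
    | cons c rest =>
      by_cases hc : c = '.'
      · subst hc
        have hp : List.isPrefixOf ['.'] ('.' :: rest) = true := by
          simp [List.isPrefixOf]
        rw [PySem.Chars.count.go, if_pos hp]
        have hdrop : List.drop (['.'] : List Char).length ('.' :: rest) = rest := rfl
        rw [hdrop, ih rest (acc + 1) (by simpa using h)]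
        simp
        omega
      · have hp : List.isPrefixOf ['.'] (c :: rest) = false := by
          simp [List.isPrefixOf]; exact fun h' => absurd h'.symm hc
        rw [PySem.Chars.count.go, if_neg (by simp [hp])]
        rw [ih rest acc (by simpa using Nat.le_of_succ_le_succ h)]
        simp [hc]

theorem count_dot (cs : List Char) : PySem.Chars.count cs ['.'] = cs.count '.' := by
  rw [PySem.Chars.count]
  rw [if_neg (by simp)]
  exact (countGo_dot cs.length cs 0 le_rfl).trans (by simp)

-- find.go with needle ['.'] in terms of partitionDot
theorem findGo_dot (cs : List Char) : ∀ (k : Nat),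
    PySem.Chars.find.go ['.'] cs k =
      (if (partitionDot cs).2.1 then ((k + (partitionDot cs).1.length : Nat) : Int) else -1) := by
  induction cs with
  | nil => intro k; simp [PySem.Chars.find.go, partitionDot]
  | cons c rest ih =>
    intro k
    by_cases hc : c = '.'
    · subst hc
      have hp : List.isPrefixOf ['.'] ('.' :: rest) = true := by simp [List.isPrefixOf]
      rw [PySem.Chars.find.go, if_pos hp]
      simp [partitionDot]
    · have hp : List.isPrefixOf ['.'] (c :: rest) = false := by
        simp [List.isPrefixOf]; exact fun h' => absurd h'.symm hc
      rw [PySem.Chars.find.go, if_neg (by simp [hp])]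
      rw [ih (k + 1)]
      simp only [partitionDot, if_neg hc]
      cases hs : (partitionDot rest).2.1 <;> simp <;> omega

-- membership in A's allowed char list
theorem mem_dotdigits (c : Char) :
    (c ∈ ['0', '1', '2', '3', '4', '5', '6', '7', '8', '9', '.'])
      ↔ (PySem.Chars.isdigit c = true ∨ c = '.') := by
  have hval : ∀ (d : Char), c = d ↔ c.toNat = d.toNat := by
    intro d
    constructor
    · rintro rfl; rfl
    · intro h
      apply Char.ext
      exact UInt32.toNat_inj.mp h
  have hle : ∀ (d : Char), (d ≤ c ↔ d.toNat ≤ c.toNat) ∧ (c ≤ d ↔ c.toNat ≤ d.toNat) := by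
    intro d
    exact ⟨⟨fun h => h, fun h => h⟩, ⟨fun h => h, fun h => h⟩⟩
  simp only [List.mem_cons, List.not_mem_nil, or_false, hval,
    PySem.Chars.isdigit, Bool.and_eq_true, decide_eq_true_eq, (hle _).1, (hle _).2]
  simp only [show ('0').toNat = 48 from rfl, show ('1').toNat = 49 from rfl, show ('2').toNat = 50 from rfl, show ('3').toNat = 51 from rfl, show ('4').toNat = 52 from rfl, show ('5').toNat = 53 from rfl, show ('6').toNat = 54 from rfl, show ('7').toNat = 55 from rfl, show ('8').toNat = 56 from rfl, show ('9').toNat = 57 from rfl, show ('.').toNat = 46 from rfl]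
  omega

-- in fractional state (s ≠ 0) the DFA just counts digits, failing on anything else
theorem dfaGo_pos (cs : List Char) : ∀ (s : Nat), s ≠ 0 →
    dfaGo cs s = if cs.all PySem.Chars.isdigit then some (s + cs.length) else none := by
  induction cs with
  | nil => intro s _; simp [dfaGo]
  | cons c rest ih =>
    intro s hs
    by_cases hd : PySem.Chars.isdigit c = true
    · rw [dfaGo, if_pos (by simpa [PySem.Chars.isdigit] using hd), if_pos hs,
        ih (s + 1) (Nat.succ_ne_zero s)]
      simp only [List.all_cons, hd, Bool.true_and, List.length_cons]
      split_ifs <;> simp <;> omega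
    · have hc : c ≠ '.' → dfaGo (c :: rest) s = none := by
        intro hne
        rw [dfaGo, if_neg (by simpa [PySem.Chars.isdigit] using hd), if_neg hne]
      by_cases hdot : c = '.'
      · subst hdot
        rw [dfaGo, if_neg (by decide), if_pos rfl, if_pos hs]
        simp [List.all_cons, show PySem.Chars.isdigit '.' = false from rfl]
      · rw [hc hdot]
        simp [List.all_cons, hd]

-- characterization of the DFA from state 0 via partitionDot
theorem dfaGo_zero (cs : List Char) :
    dfaGo cs 0 =
      (if (partitionDot cs).2.1 then
        (if (partitionDot cs).1.all PySem.Chars.isdigit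
            && (partitionDot cs).2.2.all PySem.Chars.isdigit
         then some (1 + (partitionDot cs).2.2.length) else none)
       else (if cs.all PySem.Chars.isdigit then some 0 else none)) := by
  induction cs with
  | nil => simp [dfaGo, partitionDot]
  | cons c rest ih =>
    by_cases hdot : c = '.'
    · subst hdot
      rw [dfaGo, if_neg (by decide), if_pos rfl, if_neg (by decide)]
      rw [dfaGo_pos rest 1 one_ne_zero]
      simp [partitionDot]
    · by_cases hd : PySem.Chars.isdigit c = true
      · rw [dfaGo, if_pos (by simpa [PySem.Chars.isdigit] using hd), if_neg (by decide), ih]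
        simp only [partitionDot, if_neg hdot]
        cases (partitionDot rest).2.1 <;>
          simp [List.all_cons, hd]
      · rw [dfaGo, if_neg (by simpa [PySem.Chars.isdigit] using hd), if_neg hdot]
        simp only [partitionDot, if_neg hdot]
        cases (partitionDot rest).2.1 <;>
          simp [List.all_cons, hd]

-- the else-branch of A in terms of partitionDot (per-list form)
theorem else_branch_eq (cs : List Char) :
    (if PySem.Chars.count cs ['.'] == 1 && decide (1 < (cs.length : Int)) then
      if cs.all (fun char => char ∈ ['0','1','2','3','4','5','6','7','8','9','.']) then
        if decide (PySem.Chars.find cs ['.'] < (cs.length : Int) - 3) then false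
        else if PySem.Chars.startswith cs ['-'] then false
        else true
      else false
    else false)
    = (if decide (cs.length < 2) then false
       else
        if !(partitionDot cs).2.1 then false
        else if (partitionDot cs).1.any (fun c => !PySem.Chars.isdigit c)
             || (partitionDot cs).2.2.any (fun c => !PySem.Chars.isdigit c) then false
        else decide ((partitionDot cs).2.2.length ≤ 2)) := by
  obtain ⟨hsplit, hnotin⟩ := partitionDot_spec cs
  have hfind : PySem.Chars.find cs ['.']
      = (if (partitionDot cs).2.1 then (((partitionDot cs).1.length : Nat) : Int) else -1) := by
    rw [PySem.Chars.find, findGo_dot cs 0]; simp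
  rcases hpd : partitionDot cs with ⟨i, s, f⟩
  rw [hpd] at hsplit hnotin hfind
  simp only at hsplit hnotin hfind
  cases s with
  | false =>
    rw [if_neg (Bool.false_ne_true)] at hsplit
    have hcnt : PySem.Chars.count cs ['.'] = 0 := by
      rw [count_dot, hsplit]
      exact List.count_eq_zero.mpr hnotin
    simp [hcnt]
  | true =>
    rw [if_pos rfl] at hsplit
    rw [if_pos rfl] at hfind
    subst hsplit
    simp only [Bool.not_true, Bool.false_eq_true, if_false]
    have hcnt : PySem.Chars.count (i ++ '.' :: f) ['.'] = 1 + f.count '.' := by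
      rw [count_dot]
      simp [List.count_append, List.count_eq_zero.mpr hnotin]
      omega
    by_cases hdf : '.' ∈ f
    · have h2 : ¬ ((PySem.Chars.count (i ++ '.' :: f) ['.'] == 1
          && decide (1 < (((i ++ '.' :: f).length : Nat) : Int))) = true) := by
        have := List.count_pos_iff.mpr hdf
        simp only [Bool.and_eq_true, beq_iff_eq, hcnt, not_and]
        intro h
        omega
      have hlen : ¬ (decide ((i ++ '.' :: f).length < 2) = true) := by
        have := List.length_pos_of_mem hdf
        simp only [decide_eq_true_eq, List.length_append, List.length_cons, not_lt]
        omega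
      have hfany : f.any (fun c => !PySem.Chars.isdigit c) = true :=
        List.any_eq_true.mpr ⟨'.', hdf, by decide⟩
      rw [if_neg h2, if_neg hlen, hfany]
      simp
    · have hc0 : f.count '.' = 0 := List.count_eq_zero.mpr hdf
      by_cases hlen : i = [] ∧ f = []
      · obtain ⟨hi, hf⟩ := hlen
        subst hi; subst hf
        simp
      · have hge : 1 ≤ i.length + f.length := by
          rcases (not_and_or.mp hlen) with h | h
          · have := List.length_pos_iff.mpr h; omega
          · have := List.length_pos_iff.mpr h; omega
        have hcondA : (PySem.Chars.count (i ++ '.' :: f) ['.'] == 1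
            && decide (1 < (((i ++ '.' :: f).length : Nat) : Int))) = true := by
          simp only [Bool.and_eq_true, beq_iff_eq, hcnt, hc0, decide_eq_true_eq,
            List.length_append, List.length_cons]
          refine ⟨trivial, ?_⟩
          push_cast; omega
        have hcondB : ¬ (decide ((i ++ '.' :: f).length < 2) = true) := by
          simp only [decide_eq_true_eq, List.length_append, List.length_cons, not_lt]
          omega
        rw [if_pos hcondA, if_neg hcondB]
        by_cases hall : ((i ++ '.' :: f).all
            (fun char => char ∈ ['0','1','2','3','4','5','6','7','8','9','.'])) = true
        · have halls := hall
          simp only [List.all_append, List.all_cons, Bool.and_eq_true, List.all_eq_true] at halls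
          obtain ⟨hia, _, hfa⟩ := halls
          have hi : ∀ c ∈ i, PySem.Chars.isdigit c = true := by
            intro c hc
            rcases (mem_dotdigits c).mp (by simpa using hia c hc) with h | h
            · exact h
            · exact absurd (h ▸ hc) hnotin
          have hf : ∀ c ∈ f, PySem.Chars.isdigit c = true := by
            intro c hc
            rcases (mem_dotdigits c).mp (by simpa using hfa c hc) with h | h
            · exact h
            · exact absurd (h ▸ hc) hdf
          have hany : (i.any (fun c => !PySem.Chars.isdigit c)
              || f.any (fun c => !PySem.Chars.isdigit c)) = false := by
            simp only [Bool.or_eq_false_iff, List.any_eq_false]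
            exact ⟨fun c hc => by simp [hi c hc], fun c hc => by simp [hf c hc]⟩
          have hsw : PySem.Chars.startswith (i ++ '.' :: f) ['-'] = false := by
            unfold PySem.Chars.startswith
            cases i with
            | nil => simp [List.isPrefixOf]
            | cons a t =>
              have ha : PySem.Chars.isdigit a = true := hi a (by simp)
              simp only [List.cons_append, List.isPrefixOf]
              have hne : ('-' == a) = false := by
                simp only [beq_eq_false_iff_ne]
                intro h
                rw [← h] at ha
                exact absurd ha (by decide)
              simp [hne]
          rw [if_pos hall, hfind, hsw, hany]
          by_cases hfl : f.length ≤ 2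
          · have hP : ¬ ((decide (((i.length : Nat) : Int)
                < (((i ++ '.' :: f).length : Nat) : Int) - 3)) = true) := by
              simp only [decide_eq_true_eq, List.length_append, List.length_cons, not_lt]
              push_cast; omega
            rw [if_neg hP]
            simp [hfl]
          · have hP : (decide (((i.length : Nat) : Int)
                < (((i ++ '.' :: f).length : Nat) : Int) - 3)) = true := by
              simp only [decide_eq_true_eq, List.length_append, List.length_cons]
              push_cast; omega
            rw [if_pos hP]
            simp [hfl]
        · rw [if_neg hall]
          have hT : (i.any (fun c => !PySem.Chars.isdigit c)
              || f.any (fun c => !PySem.Chars.isdigit c)) = true := by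
            by_contra hno
            apply hall
            rw [Bool.not_eq_true, Bool.or_eq_false_iff] at hno
            obtain ⟨hni, hnf⟩ := hno
            rw [List.any_eq_false] at hni hnf
            simp only [List.all_append, List.all_cons, Bool.and_eq_true, List.all_eq_true]
            refine ⟨fun c hc => ?_, by simp, fun c hc => ?_⟩
            · have := hni c hc
              simp only [Bool.not_eq_true', Bool.not_eq_false] at this
              simpa using (mem_dotdigits c).mpr (Or.inl this)
            · have := hnf c hc
              simp only [Bool.not_eq_true', Bool.not_eq_false] at this
              simpa using (mem_dotdigits c).mpr (Or.inl this)
          rw [hT]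
          simp

-- B in the same partitionDot form as A's else-branch
theorem alt_eq (string : String) :
    is_valid_num_alt string =
      (if string == "" then false
       else if PySem.Str.strIsdigit string then true
       else
        (if decide (string.toList.length < 2) then false
         else
          if !(partitionDot string.toList).2.1 then false
          else if (partitionDot string.toList).1.any (fun c => !PySem.Chars.isdigit c)
               || (partitionDot string.toList).2.2.any (fun c => !PySem.Chars.isdigit c) then false
          else decide ((partitionDot string.toList).2.2.length ≤ 2))) := by
  by_cases h0 : string = ""
  · subst h0; rfl
  · have h0' : (string == "") = false := by simpa using h0
    have hne : string.toList ≠ [] := fun h => h0 (String.toList_eq_nil_iff.mp h)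
    have hie : string.toList.isEmpty = false := by
      simpa [List.isEmpty_iff] using hne
    rw [h0']
    simp only [Bool.false_eq_true, if_false]
    unfold is_valid_num_alt
    rw [dfaGo_zero, PySem.Str.strIsdigit_eq]
    unfold PySem.Chars.strIsdigit
    rw [hie]
    obtain ⟨hsplit, hnotin⟩ := partitionDot_spec string.toList
    rcases hpd : partitionDot string.toList with ⟨i, s, f⟩
    rw [hpd] at hsplit hnotin
    simp only at hsplit hnotin ⊢
    cases s with
    | false =>
      by_cases hall : string.toList.all PySem.Chars.isdigit = true
      · simp [hall]
      · simp [Bool.eq_false_iff.mpr hall]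
    | true =>
      rw [if_pos rfl] at hsplit
      have hlen : string.toList.length = i.length + 1 + f.length := by
        rw [hsplit]; simp; omega
      have hdotmem : '.' ∈ string.toList := by rw [hsplit]; simp
      have hallF : string.toList.all PySem.Chars.isdigit = false := by
        rw [List.all_eq_false]
        exact ⟨'.', hdotmem, by decide⟩
      by_cases hall2 : (i.all PySem.Chars.isdigit && f.all PySem.Chars.isdigit) = true
      · rw [if_pos rfl, if_pos hall2]
        rw [Bool.and_eq_true, List.all_eq_true, List.all_eq_true] at hall2
        have hany : (i.any (fun c => !PySem.Chars.isdigit c)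
            || f.any (fun c => !PySem.Chars.isdigit c)) = false := by
          simp only [Bool.or_eq_false_iff, List.any_eq_false]
          exact ⟨fun c hc => by simp [hall2.1 c hc], fun c hc => by simp [hall2.2 c hc]⟩
        rw [hallF]
        simp only [Bool.and_false, Bool.false_eq_true, if_false, hany,
          Bool.not_true, Bool.false_eq_true]
        rw [if_neg (by omega), hlen]
        by_cases hsmall : i.length + 1 + f.length < 2
        · rw [if_pos (by simpa using hsmall)]
          have hno : ¬ (1 < i.length + 1 + f.length) := by omega
          simp [hno]
        · rw [if_neg (by simpa using hsmall)]
          rw [decide_eq_true (show 1 < i.length + 1 + f.length by omega)]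
          simp only [Bool.true_and]
          exact decide_eq_decide.mpr (by omega)
      · rw [if_pos rfl, if_neg hall2]
        have hany : (i.any (fun c => !PySem.Chars.isdigit c)
            || f.any (fun c => !PySem.Chars.isdigit c)) = true := by
          rcases Bool.and_eq_false_iff.mp (Bool.eq_false_iff.mpr hall2) with h | h
          · rcases List.all_eq_false.mp h with ⟨c, hc, hcd⟩
            exact Bool.or_eq_true_iff.mpr (Or.inl (List.any_eq_true.mpr ⟨c, hc, by simpa using hcd⟩))
          · rcases List.all_eq_false.mp h with ⟨c, hc, hcd⟩
            exact Bool.or_eq_true_iff.mpr (Or.inr (List.any_eq_true.mpr ⟨c, hc, by simpa using hcd⟩))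
        rw [hallF, hany]
        simp

-- ===== VERDICT (by name: the statement is the Claim_ definition above) =====
theorem is_valid_num_spec : Claim_equal_is_valid_num := by
  intro string _
  unfold Spec_is_valid_num
  rw [alt_eq]
  unfold is_valid_num
  by_cases h0 : (string == "") = true
  · rw [if_pos h0, if_pos h0]
  · rw [if_neg h0, if_neg h0]
    by_cases h1 : PySem.Str.strIsdigit string = true
    · rw [if_pos h1, if_pos h1]
    · rw [if_neg h1, if_neg h1]
      have hdot : (".".toList : List Char) = ['.'] := rfl
      have hdash : ("-".toList : List Char) = ['-'] := rfl
      have := else_branch_eq string.toList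
      simpa only [PySem.Str.count, PySem.Str.len, PySem.Str.find, pyFloatLtZero,
        PySem.Str.startswith, hdot, hdash] using this
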